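-- pv_equiv track=rewrite | github.com/haphaeu/yoshimi | EulerProject/788.py | is_dominating_str
-- ===== SOURCE A (Python) =====
-- def is_dominating_str(n):
--     nstr = str(n)
--     size = len(nstr)
--     required = size // 2 + 1
--     digits = set(nstr)
--     ndigits = len(digits)
--     max_digits = size - required + 1
--     if ndigits > max_digits:
--         return False
--     for d in digits:
--         if nstr.count(d) >= required:
--             return True
--     return False
-- ===== SOURCE B (Python) =====
-- def is_dominating_str(n):
--     s = str(n)
--     freq = {}
--     for c in s:
--         freq[c] = freq.get(c, 0) + 1
--     return max(freq.values()) >= len(s) // 2 + 1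
-- ===== Notes on version B (the rewrite author's own statement) =====
-- stated objective: simpler
-- what changed: B builds one frequency table of str(n) in a single pass and compares its maximum value with the majority threshold, replacing A's set construction, pigeonhole early-exit and per-digit rescanning count loop.
import Mathlib
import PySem

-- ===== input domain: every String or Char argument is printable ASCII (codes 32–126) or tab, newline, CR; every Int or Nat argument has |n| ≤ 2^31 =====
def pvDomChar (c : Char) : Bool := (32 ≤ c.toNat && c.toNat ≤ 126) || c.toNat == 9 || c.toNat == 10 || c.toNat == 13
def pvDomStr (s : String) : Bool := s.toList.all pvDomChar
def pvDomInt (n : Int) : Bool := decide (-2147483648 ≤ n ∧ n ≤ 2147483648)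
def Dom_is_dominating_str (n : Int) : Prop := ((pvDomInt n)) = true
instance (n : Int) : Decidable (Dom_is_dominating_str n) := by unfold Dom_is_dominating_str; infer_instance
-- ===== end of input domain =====

-- B replaces A's set + pigeonhole early-exit + per-digit rescanning with one frequency table and a max (simpler, one pass).

-- ===== PORT A =====
-- str(n) is ported as its character list (PySem.Int.toChars; exact: toList_toStr);
-- nstr.count(d) on a single character is List.count d; the for-loop over the set with
-- 'return True' is Set-order independent, ported as List.any over the Set.
def is_dominating_str (n : Int) : Bool :=
  let nstr := PySem.Int.toChars n
  let size : Int := nstr.length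
  let required : Int := PySem.Int.floordiv size 2 + 1
  let digits : PySem.Set Char := PySem.Set.ofList nstr
  let ndigits : Int := digits.length
  let max_digits : Int := size - required + 1
  if ndigits > max_digits then false
  else digits.any (fun d => required ≤ (nstr.count d : Int))

-- ===== PORT B =====
-- freq built with dict.get-default-insert loop; max(freq.values()) via PySem.List.max?
-- (the none branch is Python's max-of-empty ValueError, unreachable since str(n) ≠ "").
def is_dominating_str_alt (n : Int) : Bool :=
  let s := PySem.Int.toChars n
  let freq : PySem.Dict Char Int :=
    s.foldl (fun d c => d.insert c (d.getD c 0 + 1)) PySem.Dict.empty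
  match PySem.List.max? freq.values (fun x => x) with
  | some m => decide (PySem.Int.floordiv (s.length : Int) 2 + 1 ≤ m)
  | none => false

-- ===== PRECONDITION & SPEC =====
def Spec_is_dominating_str (n : Int) (out : Bool) : Prop := out = is_dominating_str_alt n
instance (n : Int) (out : Bool) : Decidable (Spec_is_dominating_str n out) := by unfold Spec_is_dominating_str; infer_instance

-- ===== CLAIM (what is proved, stated in full; the proofs are below) =====
def Claim_equal_is_dominating_str : Prop := ∀ (n : Int), Dom_is_dominating_str n → Spec_is_dominating_str n (is_dominating_str n)

-- ===== LEMMAS AND PROOFS =====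

-- sum of the counts of the distinct elements is the length
theorem sum_counts_ofList (s : List Char) :
    (List.map (fun x => (List.count x s)) (PySem.Set.ofList s)).sum = s.length := by
  have hperm : (PySem.Set.ofList s).Perm s.dedup :=
    (List.perm_ext_iff_of_nodup (PySem.Set.nodup_ofList s) s.nodup_dedup).mpr
      (fun a => by rw [PySem.Set.mem_ofList, List.mem_dedup])
  calc (List.map (fun x => (List.count x s)) (PySem.Set.ofList s)).sum
      = (List.map (fun x => (List.count x s)) s.dedup).sum :=
        (hperm.map _).sum_eq
    _ = s.length := List.sum_map_count_dedup_eq_length s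

-- pigeonhole: if some character reaches count r, the number of distinct characters
-- is at most length - r + 1
theorem pigeonhole (s : List Char) (k : Char) (r : Int)
    (hk : k ∈ PySem.Set.ofList s) (hc : r ≤ (s.count k : Int)) :
    ((PySem.Set.ofList s).length : Int) ≤ (s.length : Int) - r + 1 := by
  set D := PySem.Set.ofList s with hD
  have hperm : D.Perm (k :: D.erase k) := List.perm_cons_erase hk
  have hsum : (List.map (fun x => (List.count x s)) D).sum = s.length := sum_counts_ofList s
  have hsum2 : (List.map (fun x => (List.count x s)) (k :: D.erase k)).sum = s.length := by
    rw [← (hperm.map (fun x => (List.count x s))).sum_eq]; exact hsum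
  have hlow : (D.erase k).length ≤ (List.map (fun x => (List.count x s)) (D.erase k)).sum := by
    have := List.length_le_sum_of_one_le (List.map (fun x => (List.count x s)) (D.erase k))
      (by
        intro i hi
        rcases List.mem_map.mp hi with ⟨x, hx, rfl⟩
        have hxD : x ∈ D := List.mem_of_mem_erase hx
        have hxs : x ∈ s := (PySem.Set.mem_ofList s x).mp (hD ▸ hxD)
        exact List.count_pos_iff.mpr hxs)
    simpa using this
  have hlen : (D.erase k).length = D.length - 1 := List.length_erase_of_mem hk
  have hone : 1 ≤ D.length := List.length_pos_of_mem hk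
  have hnat : s.count k + (D.length - 1) ≤ s.length := by
    simp only [List.map_cons, List.sum_cons] at hsum2
    omega
  have hcast : (s.count k : Int) + ((D.length : Int) - 1) ≤ (s.length : Int) := by
    omega
  omega

-- the core list-level equivalence, for any threshold r
theorem core_eq (s : List Char) (r : Int) :
    (if ((PySem.Set.ofList s).length : Int) > (s.length : Int) - r + 1 then false
     else (PySem.Set.ofList s).any (fun d => decide (r ≤ (s.count d : Int))))
    = (match PySem.List.max?
          (List.map (fun k => ((s.count k : Int))) (PySem.Set.ofList s)) (fun x => x) with
       | some m => decide (r ≤ m)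
       | none => false) := by
  set D := PySem.Set.ofList s with hD
  rcases hmax : PySem.List.max? (List.map (fun k => ((s.count k : Int))) D) (fun x => x) with _ | m
  · -- max? = none: D = [], both sides false
    have : List.map (fun k => ((s.count k : Int))) D = [] :=
      (PySem.List.max?_eq_none_iff _ _).mp hmax
    have hDnil : D = [] := List.map_eq_nil_iff.mp this
    rw [hDnil]
    simp
  · have hmem := PySem.List.max?_mem hmax
    have hismax := PySem.List.max?_isMax hmax
    rcases List.mem_map.mp hmem with ⟨km, hkm, hkmeq⟩
    by_cases hearly : ((D.length : Int)) > (s.length : Int) - r + 1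
    · -- early exit: no count reaches r, so max < r
      rw [if_pos hearly]
      have hmlt : ¬ r ≤ m := by
        intro hrm
        have := pigeonhole s km r (hD ▸ hkm) (by rw [hkmeq]; exact hrm)
        rw [← hD] at this
        omega
      simp [hmlt]
    · rw [if_neg hearly]
      rw [Bool.eq_iff_iff]
      simp only [List.any_eq_true, decide_eq_true_iff]
      constructor
      · rintro ⟨d, hd, hrd⟩
        have : ((s.count d : Int)) ≤ m :=
          hismax _ (List.mem_map.mpr ⟨d, hd, rfl⟩)
        omega
      · intro hrm
        exact ⟨km, hkm, by rw [hkmeq]; exact hrm⟩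

-- B's frequency-table values are exactly the counts of the distinct characters
theorem values_freq (s : List Char) :
    (s.foldl (fun d c => d.insert c (d.getD c 0 + 1)) PySem.Dict.empty).values
    = List.map (fun k => ((s.count k : Int))) (PySem.Set.ofList s) := by
  rw [PySem.Dict.foldl_insert_getD_add_one_eq_counter]
  show ((PySem.Dict.counter s).items).map (·.2) = _
  rw [PySem.Dict.items_counter]
  simp

-- ===== VERDICT (by name: the statement is the Claim_ definition above) =====
theorem is_dominating_str_spec : Claim_equal_is_dominating_str := by
  intro n _
  unfold Spec_is_dominating_str is_dominating_str is_dominating_str_alt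
  simp only [values_freq]
  exact core_eq (PySem.Int.toChars n) (PySem.Int.floordiv ((PySem.Int.toChars n).length : Int) 2 + 1)
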